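-- pv_equiv track=rewrite | github.com/kknd21988/toolbox_lu | system_tools.py | str_contains_keyword_that_exists_in_keywordlist
-- ===== SOURCE A (Python) =====
-- def str_contains_keyword_that_exists_in_keywordlist(content_str, keyword_checklist):
--     '''
--
--     :param content_str:
--     :param keyword_checklist:
--     :return:
--     '''
--     keyword_exist = []
--     for keyword in keyword_checklist:
--         if keyword in content_str:
--             keyword_exist.append(keyword)
--
--     if len(keyword_exist) == 0:
--         result = False
--     else:
--         result = True
--     return result, keyword_exist
-- ===== SOURCE B (Python) =====
-- def str_contains_keyword_that_exists_in_keywordlist(content_str, keyword_checklist):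
--     # Index the distinct n-grams of content_str, one pass per distinct keyword
--     # length, so each keyword is then a single set lookup.
--     grams = {}
--     for L in set(map(len, keyword_checklist)):
--         grams[L] = {content_str[i:i + L] for i in range(len(content_str) - L + 1)}
--     keyword_exist = [k for k in keyword_checklist if k in grams.get(len(k), ())]
--     return bool(keyword_exist), keyword_exist
-- ===== Notes on version B (the rewrite author's own statement) =====
-- stated objective: faster
-- what changed: B replaces A's per-keyword substring scan of content_str with a per-keyword-length n-gram index of content_str (one pass per distinct keyword length), so each keyword becomes a single set lookup instead of a full scan.
import Mathlib
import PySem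

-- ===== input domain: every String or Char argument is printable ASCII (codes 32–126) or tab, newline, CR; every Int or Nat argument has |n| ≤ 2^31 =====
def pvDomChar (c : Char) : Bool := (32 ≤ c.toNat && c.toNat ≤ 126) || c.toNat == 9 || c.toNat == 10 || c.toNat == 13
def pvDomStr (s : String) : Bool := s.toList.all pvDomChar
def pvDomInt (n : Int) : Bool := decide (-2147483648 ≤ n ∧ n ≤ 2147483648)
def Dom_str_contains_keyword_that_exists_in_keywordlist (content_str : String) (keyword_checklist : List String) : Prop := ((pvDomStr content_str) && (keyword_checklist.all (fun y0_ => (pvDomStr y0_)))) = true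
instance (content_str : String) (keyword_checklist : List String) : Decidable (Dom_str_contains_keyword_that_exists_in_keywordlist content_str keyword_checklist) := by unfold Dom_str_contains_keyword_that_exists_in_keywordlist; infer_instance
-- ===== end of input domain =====

-- B replaces A's per-keyword substring scans with a per-keyword-length n-gram index of
-- content_str built once, so each keyword becomes one set lookup (alternative algorithm, faster in measurement).

-- ===== PORT A =====
def str_contains_keyword_that_exists_in_keywordlist (content_str : String) (keyword_checklist : List String) : Bool × List String :=
  let keyword_exist := keyword_checklist.foldl
    (fun acc keyword => if PySem.Str.isIn keyword content_str then acc ++ [keyword] else acc) []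
  let result := if keyword_exist.length = 0 then false else true
  (result, keyword_exist)

-- ===== PORT B =====
-- the set comprehension {content_str[i:i+L] for i in range(len(content_str) - L + 1)}
def pvGramSet (content_str : String) (L : Int) : PySem.Set String :=
  (PySem.List.pyRange 0 (PySem.Str.len content_str - L + 1) 1).foldl
    (fun s i => PySem.Set.add s (PySem.Str.slice content_str (some i) (some (i + L)))) PySem.Set.empty

-- the 'for L in set(map(len, keyword_checklist)): grams[L] = …' loop
def pvGrams (content_str : String) (keyword_checklist : List String) : PySem.Dict Int (PySem.Set String) :=
  (PySem.Set.ofList (keyword_checklist.map PySem.Str.len)).foldl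
    (fun d L => d.insert L (pvGramSet content_str L)) PySem.Dict.empty

def str_contains_keyword_that_exists_in_keywordlist_alt (content_str : String) (keyword_checklist : List String) : Bool × List String :=
  let grams := pvGrams content_str keyword_checklist
  let keyword_exist := keyword_checklist.filter (fun k =>
    match PySem.Dict.get? grams (PySem.Str.len k) with
    | some s => PySem.Set.contains s k
    | none => false)
  (!keyword_exist.isEmpty, keyword_exist)

-- ===== PRECONDITION & SPEC =====
def Spec_str_contains_keyword_that_exists_in_keywordlist (content_str : String) (keyword_checklist : List String) (out : Bool × List String) : Prop := out = str_contains_keyword_that_exists_in_keywordlist_alt content_str keyword_checklist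
instance (content_str : String) (keyword_checklist : List String) (out : Bool × List String) : Decidable (Spec_str_contains_keyword_that_exists_in_keywordlist content_str keyword_checklist out) := by unfold Spec_str_contains_keyword_that_exists_in_keywordlist; infer_instance

-- ===== CLAIM (what is proved, stated in full; the proofs are below) =====
def Claim_equal_str_contains_keyword_that_exists_in_keywordlist : Prop := ∀ (content_str : String) (keyword_checklist : List String), Dom_str_contains_keyword_that_exists_in_keywordlist content_str keyword_checklist → Spec_str_contains_keyword_that_exists_in_keywordlist content_str keyword_checklist (str_contains_keyword_that_exists_in_keywordlist content_str keyword_checklist)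

-- ===== LEMMAS AND PROOFS =====

-- membership in the add-fold building a gram set
lemma pv_mem_foldl_add (l : List Int) (f : Int -> String) (s0 : PySem.Set String) (y : String) :
    y ∈ l.foldl (fun s L => PySem.Set.add s (f L)) s0 ↔ y ∈ s0 ∨ ∃ L ∈ l, y = f L := by
  rw [← PySem.Set.update_map_eq_foldl_add, PySem.Set.mem_update]
  simp [eq_comm]

-- the gram dict maps each listed length to its gram set
lemma pv_get_grams (c : String) (lens : List Int) (x : Int) :
    PySem.Dict.get? (lens.foldl (fun d L => d.insert L (pvGramSet c L)) PySem.Dict.empty) x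
      = if x ∈ lens then some (pvGramSet c x) else none := by
  have key : ∀ (l : List Int) (d : PySem.Dict Int (PySem.Set String)),
      PySem.Dict.get? (l.foldl (fun d L => d.insert L (pvGramSet c L)) d) x
        = if x ∈ l then some (pvGramSet c x) else PySem.Dict.get? d x := by
    intro l
    induction l with
    | nil => intro d; simp
    | cons a rest ih =>
        intro d
        simp only [List.foldl_cons, ih, PySem.Dict.get?_insert, List.mem_cons]
        by_cases hr : x ∈ rest
        · simp [hr]
        · by_cases ha : x = a <;> simp [hr, ha]
  rw [key]
  by_cases hx : x ∈ lens <;> simp [hx, PySem.Dict.empty, PySem.Dict.get?]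

-- a keyword is in the gram set of its own length iff it occurs in the content
lemma pv_gram_correct (c : String) (k : String) :
    k ∈ pvGramSet c (PySem.Str.len k) ↔ PySem.Str.isIn k c = true := by
  unfold pvGramSet
  rw [pv_mem_foldl_add, PySem.Str.isIn_iff_infix]
  have hklen : PySem.Str.len k = (k.toList.length : Int) := PySem.Str.len_eq k
  have hclen : PySem.Str.len c = (c.toList.length : Int) := PySem.Str.len_eq c
  constructor
  · rintro (h | ⟨i, hi, hy⟩)
    · simp [PySem.Set.empty] at h
    · rw [PySem.List.mem_pyRange_one] at hi
      rw [hy, PySem.Str.toList_slice, PySem.Chars.slice_eq_listSlice,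
        PySem.List.slice_toNat c.toList hi.1 (by omega)]
      exact ((List.take_prefix _ _).isInfix).trans (List.drop_suffix _ _).isInfix
  · intro hinf
    rcases hinf with ⟨s, t, hst⟩
    have hpre : k.toList <+: List.drop s.length c.toList := by
      rw [← hst, List.append_assoc, List.drop_left' rfl]
      exact ⟨t, rfl⟩
    have hjlen : s.length + k.toList.length ≤ c.toList.length := by
      rw [← hst]; simp
    refine Or.inr ⟨(s.length : Int), ?_, ?_⟩
    · rw [PySem.List.mem_pyRange_one]; constructor <;> omega
    · rw [← String.toList_inj, PySem.Str.toList_slice, PySem.Chars.slice_eq_listSlice,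
        PySem.List.slice_toNat c.toList (by omega) (by omega)]
      have h1 : ((s.length : Int) + PySem.Str.len k).toNat - ((s.length : Int)).toNat
          = k.toList.length := by omega
      rw [h1, Int.toNat_natCast]
      exact (List.prefix_iff_eq_take.mp hpre)

-- B's per-keyword test agrees with Python's 'in' on every keyword of the checklist
lemma pv_lookup_eq (c : String) (kl : List String) (k : String) (hk : k ∈ kl) :
    (match PySem.Dict.get? (pvGrams c kl) (PySem.Str.len k) with
      | some s => PySem.Set.contains s k
      | none => false) = PySem.Str.isIn k c := by
  unfold pvGrams
  rw [pv_get_grams]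
  have hmem : PySem.Str.len k ∈ PySem.Set.ofList (kl.map PySem.Str.len) := by
    rw [PySem.Set.mem_ofList]
    exact List.mem_map_of_mem hk
  rw [if_pos hmem]
  exact Bool.eq_iff_iff.mpr ((PySem.Set.contains_iff _ _).trans (pv_gram_correct c k))

-- ===== VERDICT (by name: the statement is the Claim_ definition above) =====
theorem str_contains_keyword_that_exists_in_keywordlist_spec : Claim_equal_str_contains_keyword_that_exists_in_keywordlist := by
  intro content_str keyword_checklist _
  unfold Spec_str_contains_keyword_that_exists_in_keywordlist
  unfold str_contains_keyword_that_exists_in_keywordlist str_contains_keyword_that_exists_in_keywordlist_alt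
  have hfold := PySem.List.foldl_append_if
    (fun k => PySem.Str.isIn k content_str) (fun k => k) keyword_checklist []
  have hfilter := List.filter_congr
    (fun k hk => pv_lookup_eq content_str keyword_checklist k hk)
  simp only [hfold, List.nil_append, List.map_id', hfilter]
  refine Prod.ext ?_ rfl
  simp only []
  cases h : keyword_checklist.filter (fun k => PySem.Str.isIn k content_str) <;> simp
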